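-- pv_equiv track=rewrite | github.com/evil-skills/project-understanding | skills/project-understanding/scripts/lib/graph.py | _filter_test_files
-- ===== SOURCE A (Python) =====
-- from typing import List, Dict, Any, Optional, Set, Tuple, Union
--
-- def _filter_test_files(files: List[str]) -> List[str]:
--     """Identify test files from a list of paths."""
--     test_patterns = [
--         'test_',
--         '_test.',
--         '_spec.',
--         '.spec.',
--         'tests/',
--         '/tests/',
--         '__tests__/',
--         '/__tests__/',
--     ]
--
--     test_files = []
--     for f in files:
--         f_lower = f.lower()
--         if any(pattern in f_lower for pattern in test_patterns):
--             test_files.append(f)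
--
--     return sorted(test_files)
-- ===== SOURCE B (Python) =====
-- def _filter_test_files(files):
--     """Identify test files from a list of paths."""
--     test_patterns = [
--         'test_',
--         '_test.',
--         '_spec.',
--         '.spec.',
--         'tests/',
--         '/tests/',
--         '__tests__/',
--         '/__tests__/',
--     ]
--
--     hits = set()
--     for pattern in test_patterns:
--         hits.update(f for f in files if pattern in f.lower())
--
--     return [f for f in sorted(files) if f in hits]
-- ===== Notes on version B (the rewrite author's own statement) =====
-- stated objective: alternative
-- what changed: B inverts the loop nesting: it iterates pattern-major, collecting every matching path once into a hash set, then emits sorted(files) filtered by set membership, instead of A's file-major any()-over-patterns filter followed by sorted().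
import Mathlib
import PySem

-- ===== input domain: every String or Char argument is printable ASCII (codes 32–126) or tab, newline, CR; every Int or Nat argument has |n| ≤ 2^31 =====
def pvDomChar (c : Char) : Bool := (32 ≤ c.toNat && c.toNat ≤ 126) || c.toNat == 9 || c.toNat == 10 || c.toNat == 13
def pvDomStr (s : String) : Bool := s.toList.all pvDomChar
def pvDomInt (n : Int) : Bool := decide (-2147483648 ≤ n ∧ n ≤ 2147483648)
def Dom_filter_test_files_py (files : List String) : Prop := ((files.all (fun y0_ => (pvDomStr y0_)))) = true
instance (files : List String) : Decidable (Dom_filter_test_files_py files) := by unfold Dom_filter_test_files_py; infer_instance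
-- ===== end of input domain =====

-- B inverts the loops (pattern-major, collecting hits into a set, then a sorted membership-filtered
-- pass) instead of A's file-major any()-over-patterns filter then sort; alternative, same cost.

-- ===== PORT A =====
def pvPatternsA : List String :=
  ["test_", "_test.", "_spec.", ".spec.", "tests/", "/tests/", "__tests__/", "/__tests__/"]

def filter_test_files_py (files : List String) : List String :=
  PySem.List.sorted
    (files.foldl (fun test_files f =>
      let f_lower := PySem.Str.lower f
      if pvPatternsA.any (fun pattern => PySem.Str.isIn pattern f_lower)
      then test_files ++ [f] else test_files) [])
    (fun x => x) false

-- ===== PORT B =====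
def pvPatternsB : List String :=
  ["test_", "_test.", "_spec.", ".spec.", "tests/", "/tests/", "__tests__/", "/__tests__/"]

def filter_test_files_py_alt (files : List String) : List String :=
  let hits : PySem.Set String :=
    pvPatternsB.foldl (fun hits pattern =>
      PySem.Set.update hits (files.filter (fun f => PySem.Str.isIn pattern (PySem.Str.lower f))))
      PySem.Set.empty
  (PySem.List.sorted files (fun x => x) false).filter (fun f => PySem.Set.contains hits f)

-- ===== PRECONDITION & SPEC =====
def Spec_filter_test_files_py (files : List String) (out : List String) : Prop := out = filter_test_files_py_alt files
instance (files : List String) (out : List String) : Decidable (Spec_filter_test_files_py files out) := by unfold Spec_filter_test_files_py; infer_instance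

-- ===== CLAIM (what is proved, stated in full; the proofs are below) =====
def Claim_equal_filter_test_files_py : Prop := ∀ (files : List String), Dom_filter_test_files_py files → Spec_filter_test_files_py files (filter_test_files_py files)

-- ===== LEMMAS AND PROOFS =====

-- membership in the set built pattern-major: x is in some per-pattern filter of files
theorem pvMem_hits (files : List String) (ps : List String) (s : PySem.Set String) (x : String) :
    (x ∈ ps.foldl (fun hits pattern =>
        PySem.Set.update hits (files.filter (fun f => PySem.Str.isIn pattern (PySem.Str.lower f)))) s)
      ↔ x ∈ s ∨ ∃ p ∈ ps, x ∈ files ∧ PySem.Str.isIn p (PySem.Str.lower x) = true := by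
  induction ps generalizing s with
  | nil => simp
  | cons p ps ih =>
    simp only [List.foldl_cons, ih, PySem.Set.mem_update, List.mem_filter, List.mem_cons]
    constructor
    · rintro ((h | ⟨hf, hp⟩) | ⟨q, hq, hf, hp⟩)
      · exact Or.inl h
      · exact Or.inr ⟨p, Or.inl rfl, hf, hp⟩
      · exact Or.inr ⟨q, Or.inr hq, hf, hp⟩
    · rintro (h | ⟨q, (rfl | hq), hf, hp⟩)
      · exact Or.inl (Or.inl h)
      · exact Or.inl (Or.inr ⟨hf, hp⟩)
      · exact Or.inr ⟨q, hq, hf, hp⟩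

-- filtering commutes with the stable identity sort
theorem pvSort_filter_comm (q : String → Bool) (xs : List String) :
    PySem.List.sorted (xs.filter q) (fun x => x) false
      = (PySem.List.sorted xs (fun x => x) false).filter q := by
  apply PySem.List.sorted_id_eq_of_perm_of_pairwise
  · exact (PySem.List.sorted_perm xs (fun x => x) false).filter q
  · exact (PySem.List.sorted_pairwise xs (fun x => x)).filter _

-- ===== VERDICT (by name: the statement is the Claim_ definition above) =====
theorem filter_test_files_py_spec : Claim_equal_filter_test_files_py := by
  intro files _
  unfold Spec_filter_test_files_py filter_test_files_py filter_test_files_py_alt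
  have hA := PySem.List.foldl_append_if
    (fun f => pvPatternsA.any (fun pattern => PySem.Str.isIn pattern (PySem.Str.lower f)))
    (fun f => f) files []
  simp only [List.nil_append, List.map_id'] at hA
  rw [hA, pvSort_filter_comm]
  apply List.filter_congr
  intro f hf
  have hfmem : f ∈ files := (PySem.List.sorted_perm files (fun x => x) false).mem_iff.mp hf
  have hcon : PySem.Set.contains
      (pvPatternsB.foldl (fun hits pattern =>
        PySem.Set.update hits (files.filter (fun g => PySem.Str.isIn pattern (PySem.Str.lower g))))
        PySem.Set.empty) f
      = pvPatternsB.any (fun pattern => PySem.Str.isIn pattern (PySem.Str.lower f)) := by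
    rw [Bool.eq_iff_iff, PySem.Set.contains_iff, pvMem_hits]
    simp only [PySem.Set.empty, List.not_mem_nil, false_or, List.any_eq_true]
    constructor
    · rintro ⟨p, hp, _, h⟩; exact ⟨p, hp, h⟩
    · rintro ⟨p, hp, h⟩; exact ⟨p, hp, hfmem, h⟩
  rw [hcon]
  rfl
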